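-- pv_equiv track=rewrite | github.com/shunkongcheung/crestedmyna | backend/game/gme_sudoku/utils/get_is_board_valid.py | get_is_area_unique
-- ===== SOURCE A (Python) =====
-- def get_is_area_unique(board, start_column, start_row, ignore_empty):
--     area_values = []
--     for column_idx in range(start_column, 3):
--         for row_idx in range(start_row, 3):
--             cur_item = board[row_idx][column_idx]
--             if cur_item == '' and ignore_empty:
--                 continue
--             if cur_item in area_values:
--                 return False
--             area_values.append(cur_item)
--     return True
-- ===== SOURCE B (Python) =====
-- def get_is_area_unique(board, start_column, start_row, ignore_empty):
--     values = sorted(board[row_idx][column_idx]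
--                     for column_idx in range(start_column, 3)
--                     for row_idx in range(start_row, 3)
--                     if not (ignore_empty and board[row_idx][column_idx] == ''))
--     return all(a != b for a, b in zip(values, values[1:]))
-- ===== Notes on version B (the rewrite author's own statement) =====
-- stated objective: alternative
-- what changed: Replaces A's incremental membership-test-with-early-return accumulation by a sort-then-scan algorithm: collect the area values, sort them, and decide uniqueness by checking that no two adjacent elements of the sorted list are equal.
-- outside the precondition, e.g. on get_is_area_unique([['1'], ['1']], 0, 0, False): A returns False, B raises IndexError
import Mathlib
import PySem

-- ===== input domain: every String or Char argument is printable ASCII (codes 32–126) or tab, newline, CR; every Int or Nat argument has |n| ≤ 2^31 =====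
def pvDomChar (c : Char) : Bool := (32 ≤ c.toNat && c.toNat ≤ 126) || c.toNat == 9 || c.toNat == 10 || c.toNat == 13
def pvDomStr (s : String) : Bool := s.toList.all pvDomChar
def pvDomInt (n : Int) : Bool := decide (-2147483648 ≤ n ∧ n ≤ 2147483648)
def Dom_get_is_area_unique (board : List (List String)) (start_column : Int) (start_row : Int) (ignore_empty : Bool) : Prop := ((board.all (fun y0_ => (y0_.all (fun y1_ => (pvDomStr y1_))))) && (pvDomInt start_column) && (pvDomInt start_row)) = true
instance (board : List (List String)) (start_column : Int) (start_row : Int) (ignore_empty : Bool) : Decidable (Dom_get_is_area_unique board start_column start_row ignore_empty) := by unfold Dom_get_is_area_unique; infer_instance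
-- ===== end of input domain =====

-- B replaces A's incremental membership-test-with-early-return accumulation by a
-- sort-then-scan algorithm: collect the area values, sort them, and check that no
-- two adjacent elements of the sorted list are equal (objective: alternative).

-- board[row_idx][column_idx]; none = IndexError
def pvCell? (board : List (List String)) (r c : Int) : Option String :=
  (PySem.List.pyGet? board r).bind (fun row => PySem.List.pyGet? row c)

-- ===== PORT A =====
-- inner 'for row_idx in …' loop; none = the function returns False (an out-of-range
-- cell is folded into none too, which is unreachable under Pre_)
def pvInnerA (board : List (List String)) (c : Int) (rows : List Int)
    (ignore_empty : Bool) (acc : List String) : Option (List String) :=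
  match rows with
  | [] => some acc
  | r :: rs =>
    match pvCell? board r c with
    | none => none
    | some cur =>
      if cur = "" ∧ ignore_empty then pvInnerA board c rs ignore_empty acc
      else if cur ∈ acc then none
      else pvInnerA board c rs ignore_empty (acc ++ [cur])

def pvOuterA (board : List (List String)) (cols : List Int) (start_row : Int)
    (ignore_empty : Bool) (acc : List String) : Bool :=
  match cols with
  | [] => true
  | c :: cs =>
    match pvInnerA board c (PySem.List.pyRange start_row 3 1) ignore_empty acc with
    | none => false
    | some acc' => pvOuterA board cs start_row ignore_empty acc'

def get_is_area_unique (board : List (List String)) (start_column : Int) (start_row : Int) (ignore_empty : Bool) : Bool :=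
  pvOuterA board (PySem.List.pyRange start_column 3 1) start_row ignore_empty []

-- ===== PORT B =====
-- the generator expression fed to sorted (an out-of-range cell is skipped, unreachable under Pre_)
def pvValuesB (board : List (List String)) (start_column : Int) (start_row : Int)
    (ignore_empty : Bool) : List String :=
  (PySem.List.pyRange start_column 3 1).flatMap (fun c =>
    (PySem.List.pyRange start_row 3 1).filterMap (fun r =>
      (pvCell? board r c).bind (fun cur =>
        if ignore_empty ∧ cur = "" then none else some cur)))

def get_is_area_unique_alt (board : List (List String)) (start_column : Int) (start_row : Int) (ignore_empty : Bool) : Bool :=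
  let values := PySem.List.sorted (pvValuesB board start_column start_row ignore_empty) (fun x => x) false
  -- all(a != b for a, b in zip(values, values[1:]))
  (values.zip (values.drop 1)).all (fun p => p.1 != p.2)

-- ===== PRECONDITION & SPEC =====
-- Pre_: every cell of the scanned area exists. This also excludes inputs where A
-- happens to return False at a duplicate found before reaching a missing cell,
-- on which B's collection raises IndexError.
def Pre_get_is_area_unique (board : List (List String)) (start_column : Int) (start_row : Int) (ignore_empty : Bool) : Prop :=
  3 ≤ start_column ∨ 3 ≤ start_row ∨
  (3 ≤ (board.length : Int) ∧ -(board.length : Int) ≤ start_row ∧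
   ∀ r ∈ PySem.List.pyRange (max start_row (-(board.length : Int))) 3 1,
     3 ≤ ((PySem.List.pyGetD board r []).length : Int) ∧
     -((PySem.List.pyGetD board r []).length : Int) ≤ start_column)
instance (board : List (List String)) (start_column : Int) (start_row : Int) (ignore_empty : Bool) : Decidable (Pre_get_is_area_unique board start_column start_row ignore_empty) := by unfold Pre_get_is_area_unique; infer_instance

def pvWitness_get_is_area_unique : List (List String) × Int × Int × Bool :=
  ([["1", "2", "3"], ["4", "", "5"], ["6", "", "7"]], 0, 0, true)

def Spec_get_is_area_unique (board : List (List String)) (start_column : Int) (start_row : Int) (ignore_empty : Bool) (out : Bool) : Prop := out = get_is_area_unique_alt board start_column start_row ignore_empty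
instance (board : List (List String)) (start_column : Int) (start_row : Int) (ignore_empty : Bool) (out : Bool) : Decidable (Spec_get_is_area_unique board start_column start_row ignore_empty out) := by unfold Spec_get_is_area_unique; infer_instance

-- ===== CLAIM (what is proved, stated in full; the proofs are below) =====
def Claim_equal_get_is_area_unique : Prop := ∀ (board : List (List String)) (start_column : Int) (start_row : Int) (ignore_empty : Bool), Dom_get_is_area_unique board start_column start_row ignore_empty → Pre_get_is_area_unique board start_column start_row ignore_empty → Spec_get_is_area_unique board start_column start_row ignore_empty (get_is_area_unique board start_column start_row ignore_empty)

-- ===== LEMMAS AND PROOFS =====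

-- values contributed by one column c over the given rows
def pvColVals (board : List (List String)) (c : Int) (rows : List Int) (ignore_empty : Bool) : List String :=
  rows.filterMap (fun r =>
    (pvCell? board r c).bind (fun cur =>
      if ignore_empty ∧ cur = "" then none else some cur))

lemma pvPre_cells (board : List (List String)) (sc sr : Int) (ie : Bool)
    (h : Pre_get_is_area_unique board sc sr ie) :
    ∀ c ∈ PySem.List.pyRange sc 3 1, ∀ r ∈ PySem.List.pyRange sr 3 1,
      (pvCell? board r c).isSome := by
  intro c hc r hr
  rw [PySem.List.mem_pyRange_one] at hc hr
  rcases h with h | h | ⟨h1, h2, h3⟩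
  · omega
  · omega
  · have hrmem : r ∈ PySem.List.pyRange (max sr (-(board.length : Int))) 3 1 :=
      PySem.List.mem_pyRange_one.mpr ⟨by omega, by omega⟩
    have hrow : (PySem.List.pyGet? board r).isSome := by
      cases hx : PySem.List.pyGet? board r with
      | none => exact absurd ⟨by omega, by omega⟩ ((PySem.List.pyGet?_eq_none_iff board r).mp hx)
      | some row => rfl
    obtain ⟨row, hrow⟩ := Option.isSome_iff_exists.mp hrow
    have hlen := h3 r hrmem
    rw [show PySem.List.pyGetD board r [] = row by simp [PySem.List.pyGetD, hrow]] at hlen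
    have : (PySem.List.pyGet? row c).isSome := by
      cases hx : PySem.List.pyGet? row c with
      | none => exact absurd ⟨by omega, by omega⟩ ((PySem.List.pyGet?_eq_none_iff row c).mp hx)
      | some v => rfl
    simpa [pvCell?, hrow] using this

lemma pvInnerA_eq (board : List (List String)) (c : Int) (rows : List Int)
    (ie : Bool) (acc : List String)
    (h : ∀ r ∈ rows, (pvCell? board r c).isSome) (hacc : acc.Nodup) :
    pvInnerA board c rows ie acc =
      if (acc ++ pvColVals board c rows ie).Nodup then some (acc ++ pvColVals board c rows ie)
      else none := by
  induction rows generalizing acc with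
  | nil => simp [pvInnerA, pvColVals, hacc]
  | cons r rs ih =>
    have hr : (pvCell? board r c).isSome := h r (by simp)
    obtain ⟨cur, hcur⟩ := Option.isSome_iff_exists.mp hr
    have hrs : ∀ r' ∈ rs, (pvCell? board r' c).isSome := fun r' hr' => h r' (by simp [hr'])
    by_cases hskip : cur = "" ∧ ie
    · obtain ⟨he, hie⟩ := hskip
      subst hie
      simp [pvInnerA, pvColVals, hcur, he, ih _ hrs hacc]
    · have hkeep : (if ie ∧ cur = "" then none else some cur) = some cur := by
        rw [if_neg]; intro hx; exact hskip ⟨hx.2, hx.1⟩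
      have hvals : pvColVals board c (r :: rs) ie = cur :: pvColVals board c rs ie := by
        simp only [pvColVals, List.filterMap_cons, hcur, Option.bind_some, hkeep]
      by_cases hmem : cur ∈ acc
      · have hnot : ¬ (acc ++ pvColVals board c (r :: rs) ie).Nodup := by
          intro hnd
          have disj := (List.nodup_append.mp hnd).2.2
          exact disj cur hmem cur (by rw [hvals]; exact List.mem_cons_self ..) rfl
        simp [pvInnerA, hcur, hskip, hmem, hnot]
      · have hacc' : (acc ++ [cur]).Nodup := by
          simp [List.nodup_append, hacc]
          intro a ha hcontra
          exact hmem (hcontra ▸ ha)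
        simp only [pvInnerA, hcur]
        rw [if_neg hskip, if_neg hmem, ih _ hrs hacc', hvals,
          show (acc ++ [cur]) ++ pvColVals board c rs ie = acc ++ (cur :: pvColVals board c rs ie) by simp]

lemma pvOuterA_eq (board : List (List String)) (cols : List Int) (sr : Int)
    (ie : Bool) (acc : List String)
    (h : ∀ c ∈ cols, ∀ r ∈ PySem.List.pyRange sr 3 1, (pvCell? board r c).isSome)
    (hacc : acc.Nodup) :
    pvOuterA board cols sr ie acc =
      decide ((acc ++ cols.flatMap (fun c => pvColVals board c (PySem.List.pyRange sr 3 1) ie)).Nodup) := by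
  induction cols generalizing acc with
  | nil => simp [pvOuterA, hacc]
  | cons c cs ih =>
    have hc := h c (by simp)
    have hcs : ∀ c' ∈ cs, ∀ r ∈ PySem.List.pyRange sr 3 1, (pvCell? board r c').isSome :=
      fun c' h' => h c' (by simp [h'])
    rw [pvOuterA, pvInnerA_eq board c _ ie acc hc hacc]
    by_cases hnd : (acc ++ pvColVals board c (PySem.List.pyRange sr 3 1) ie).Nodup
    · rw [if_pos hnd]
      show pvOuterA board cs sr ie (acc ++ pvColVals board c (PySem.List.pyRange sr 3 1) ie) = _
      rw [ih _ hcs hnd]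
      simp only [List.flatMap_cons, List.append_assoc]
    · rw [if_neg hnd]
      show false = _
      have hnot : ¬ (acc ++ (pvColVals board c (PySem.List.pyRange sr 3 1) ie
          ++ cs.flatMap (fun c => pvColVals board c (PySem.List.pyRange sr 3 1) ie))).Nodup :=
        fun hx => hnd (hx.sublist (by rw [← List.append_assoc]; exact List.sublist_append_left _ _))
      simp [List.flatMap_cons, hnot]

-- zip(l, l[1:]) all-distinct is exactly IsChain (· ≠ ·)
lemma pvZipAll_eq_chain (l : List String) :
    ((l.zip (l.drop 1)).all (fun p => p.1 != p.2) = true) ↔ l.IsChain (· ≠ ·) := by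
  induction l with
  | nil => simp
  | cons x xs ih =>
    cases xs with
    | nil => simp
    | cons y ys =>
      simp only [List.drop_one, List.tail_cons, List.zip_cons_cons, List.all_cons,
        Bool.and_eq_true, List.isChain_cons_cons, bne_iff_ne, ne_eq]
      exact and_congr Iff.rfl ih

-- combine two IsChains pointwise
lemma pvChain_and {α : Type} {R S : α → α → Prop} (l : List α)
    (hr : l.IsChain R) (hs : l.IsChain S) : l.IsChain (fun a b => R a b ∧ S a b) := by
  induction l with
  | nil => exact List.isChain_nil
  | cons x xs ih =>
    cases xs with
    | nil => exact List.isChain_singleton x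
    | cons y ys =>
      rw [List.isChain_cons_cons] at hr hs ⊢
      exact ⟨⟨hr.1, hs.1⟩, ih hr.2 hs.2⟩

-- on a ≤-sorted list, adjacent-distinct is exactly Nodup
lemma pvChain_ne_iff_nodup (s : List String) (hp : s.Pairwise (· ≤ ·)) :
    s.IsChain (· ≠ ·) ↔ s.Nodup := by
  constructor
  · intro hne
    have hle : s.IsChain (· ≤ ·) := List.isChain_iff_pairwise.mpr hp
    have hlt : s.IsChain (· < ·) := by
      refine (pvChain_and s hle hne).imp ?_
      intro a b ⟨h1, h2⟩; exact lt_of_le_of_ne h1 h2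
    exact (List.isChain_iff_pairwise.mp hlt).imp ne_of_lt
  · intro hnd
    exact hnd.isChain

theorem get_is_area_unique_spec : Claim_equal_get_is_area_unique := by
  intro board sc sr ie _hDom hPre
  unfold Spec_get_is_area_unique get_is_area_unique get_is_area_unique_alt
  rw [pvOuterA_eq board _ sr ie [] (pvPre_cells board sc sr ie hPre) List.nodup_nil]
  have hvals : pvValuesB board sc sr ie
      = (PySem.List.pyRange sc 3 1).flatMap (fun c => pvColVals board c (PySem.List.pyRange sr 3 1) ie) := by
    simp [pvValuesB, pvColVals]
  simp only [List.nil_append]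
  rw [← hvals]
  set vs := pvValuesB board sc sr ie with hvs
  set s := PySem.List.sorted vs (fun x => x) false with hs
  show decide vs.Nodup = ((s.zip (s.drop 1)).all fun p => p.1 != p.2)
  have hperm : s.Perm vs := PySem.List.sorted_perm vs (fun x => x) false
  have hpair : s.Pairwise (fun a b => (fun x => x) a ≤ (fun x => x) b) :=
    PySem.List.sorted_pairwise vs (fun x => x)
  have hiff : ((s.zip (s.drop 1)).all (fun p => p.1 != p.2) = true) ↔ vs.Nodup := by
    rw [pvZipAll_eq_chain, pvChain_ne_iff_nodup s hpair]
    exact hperm.nodup_iff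
  by_cases hnd : vs.Nodup
  · rw [hiff.mpr hnd]; simp [hnd]
  · cases hx : (s.zip (s.drop 1)).all (fun p => p.1 != p.2) with
    | true => exact absurd (hiff.mp hx) hnd
    | false => simp [hnd]
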